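-- pv_equiv track=rewrite | github.com/LLNL/Surfactant | scripts/merge_sbom.py | find_relationship_entry
-- ===== SOURCE A (Python) =====
-- from typing import Optional
--
-- def find_relationship_entry(
--     sbom,
--     xUUID: Optional[str] = None,
--     yUUID: Optional[str] = None,
--     relationship: Optional[str] = None,
-- ) -> Optional[dict]:
--     """Search for a specific relationship entry and check if a match exists.
--
--     Args:
--         sbom (dict): Dictionary containing sbom entries.
--         xUUID (Optional[str]): Component x UUID. Defaults to None.
--         yUUID (Optional[str]): Component y UUID. Defaults to None.
--         relationship (Optional[str]): Describes the relationships between two components. Options are 'Uses', 'Contains'. Defaults to None.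
--
--     Returns:
--         Optional[dict]: Dictionary entry that contains information where the xUUID, yUUID and relationship all match. If no match, returns None.
--     """
--     for rel in sbom["relationships"]:
--         all_match = True
--         if xUUID:
--             if rel["xUUID"] != xUUID:
--                 all_match = False
--         if yUUID:
--             if rel["yUUID"] != yUUID:
--                 all_match = False
--         if relationship:
--             if rel["relationship"] != relationship:
--                 all_match = False
--         if all_match:
--             return rel
--     return None
-- ===== SOURCE B (Python) =====
-- def find_relationship_entry(
--     sbom,
--     xUUID=None,
--     yUUID=None,
--     relationship=None,
-- ):
--     # Staged filtering: each supplied (truthy) criterion narrows the candidate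
--     # list in its own pass; the answer is the first surviving candidate.
--     candidates = sbom["relationships"]
--     for key, value in (("xUUID", xUUID), ("yUUID", yUUID), ("relationship", relationship)):
--         if value:
--             candidates = [rel for rel in candidates if rel[key] == value]
--     return candidates[0] if candidates else None
-- ===== Notes on version B (the rewrite author's own statement) =====
-- stated objective: alternative
-- what changed: Replaces A's single early-return scan with an all_match flag by staged filtering: each truthy criterion narrows the candidate list in its own list-comprehension pass, and the result is the head of the surviving candidates.
import Mathlib
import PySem

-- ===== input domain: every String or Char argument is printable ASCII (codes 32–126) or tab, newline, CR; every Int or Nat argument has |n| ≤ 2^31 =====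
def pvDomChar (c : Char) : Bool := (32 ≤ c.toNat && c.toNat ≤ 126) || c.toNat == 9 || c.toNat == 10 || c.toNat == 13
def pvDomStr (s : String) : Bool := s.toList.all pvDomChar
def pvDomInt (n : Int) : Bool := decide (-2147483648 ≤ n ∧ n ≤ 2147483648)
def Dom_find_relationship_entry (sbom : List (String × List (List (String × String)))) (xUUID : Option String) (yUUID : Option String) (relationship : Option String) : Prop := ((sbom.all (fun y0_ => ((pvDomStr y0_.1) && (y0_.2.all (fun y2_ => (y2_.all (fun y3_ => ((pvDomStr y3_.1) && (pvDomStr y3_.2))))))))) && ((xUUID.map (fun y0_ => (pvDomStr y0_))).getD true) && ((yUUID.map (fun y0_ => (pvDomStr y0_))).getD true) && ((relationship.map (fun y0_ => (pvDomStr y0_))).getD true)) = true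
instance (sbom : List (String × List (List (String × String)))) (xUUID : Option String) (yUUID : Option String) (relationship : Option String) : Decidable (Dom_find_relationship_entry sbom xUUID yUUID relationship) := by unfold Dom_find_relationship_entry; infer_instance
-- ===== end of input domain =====

-- B replaces A's single early-return scan with an all_match flag by staged filtering:
-- each truthy criterion narrows the candidate list in its own pass, the answer is the
-- head of the survivors (alternative decomposition, same cost).

-- shared primitives: Python dict lookup on an association list = first match; truthiness of an Optional[str]
def pvLookup {α : Type} (d : List (String × α)) (k : String) : Option α :=
  (d.find? (fun p => p.1 == k)).map (fun p => p.2)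

def pvTruthy (o : Option String) : Bool := o.getD "" ≠ ""

-- ===== PORT A =====
-- loop body: the three independent `if` branches updating all_match, in A's order;
-- rel["k"] is pvLookup (Pre_ excludes the KeyError case, where pvLookup is none)
def pvMatchA (xUUID yUUID relationship : Option String) (rel : List (String × String)) : Bool :=
  let all_match := true
  let all_match := if pvTruthy xUUID then
      (if pvLookup rel "xUUID" ≠ some (xUUID.getD "") then false else all_match) else all_match
  let all_match := if pvTruthy yUUID then
      (if pvLookup rel "yUUID" ≠ some (yUUID.getD "") then false else all_match) else all_match
  let all_match := if pvTruthy relationship then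
      (if pvLookup rel "relationship" ≠ some (relationship.getD "") then false else all_match) else all_match
  all_match

def pvLoopA (xUUID yUUID relationship : Option String) :
    List (List (String × String)) → Option (List (String × String))
  | [] => none
  | rel :: rest =>
    if pvMatchA xUUID yUUID relationship rel then some rel
    else pvLoopA xUUID yUUID relationship rest

def find_relationship_entry (sbom : List (String × List (List (String × String)))) (xUUID : Option String) (yUUID : Option String) (relationship : Option String) : Option (List (String × String)) :=
  match pvLookup sbom "relationships" with
  | none => none   -- KeyError in Python; excluded by Pre_
  | some rels => pvLoopA xUUID yUUID relationship rels

-- ===== PORT B =====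
-- one filtering stage: if the criterion value is truthy, keep the candidates whose
-- key equals it (a missing key is a KeyError in Python; Pre_ excludes it, here the
-- none lookup simply fails the comparison)
def pvStage (cands : List (List (String × String))) (kv : String × Option String) :
    List (List (String × String)) :=
  if pvTruthy kv.2 then cands.filter (fun rel => pvLookup rel kv.1 == some (kv.2.getD ""))
  else cands

def find_relationship_entry_alt (sbom : List (String × List (List (String × String)))) (xUUID : Option String) (yUUID : Option String) (relationship : Option String) : Option (List (String × String)) :=
  match pvLookup sbom "relationships" with
  | none => none   -- KeyError in Python; excluded by Pre_
  | some rels =>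
    ([("xUUID", xUUID), ("yUUID", yUUID), ("relationship", relationship)].foldl
      pvStage rels).head?

-- ===== PRECONDITION & SPEC =====
-- Pre_ excludes sboms without a "relationships" key and those where some relationship entry
-- lacks a key selected by a truthy argument: B raises KeyError there (A can return if it
-- matches an earlier entry first — see cites).
def Pre_find_relationship_entry (sbom : List (String × List (List (String × String)))) (xUUID : Option String) (yUUID : Option String) (relationship : Option String) : Prop :=
  (pvLookup sbom "relationships").isSome = true ∧
  ∀ rel ∈ (pvLookup sbom "relationships").getD [],
    (pvTruthy xUUID = true → (pvLookup rel "xUUID").isSome = true) ∧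
    (pvTruthy yUUID = true → (pvLookup rel "yUUID").isSome = true) ∧
    (pvTruthy relationship = true → (pvLookup rel "relationship").isSome = true)
instance (sbom : List (String × List (List (String × String)))) (xUUID : Option String) (yUUID : Option String) (relationship : Option String) : Decidable (Pre_find_relationship_entry sbom xUUID yUUID relationship) := by unfold Pre_find_relationship_entry; infer_instance

def pvWitness_find_relationship_entry : (List (String × List (List (String × String)))) × Option String × Option String × Option String :=
  ([("relationships", [[("xUUID", "a"), ("yUUID", "b")], [("xUUID", "c"), ("yUUID", "b")]])], some "c", some "b", none)

def Spec_find_relationship_entry (sbom : List (String × List (List (String × String)))) (xUUID : Option String) (yUUID : Option String) (relationship : Option String) (out : Option (List (String × String))) : Prop := out = find_relationship_entry_alt sbom xUUID yUUID relationship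
instance (sbom : List (String × List (List (String × String)))) (xUUID : Option String) (yUUID : Option String) (relationship : Option String) (out : Option (List (String × String))) : Decidable (Spec_find_relationship_entry sbom xUUID yUUID relationship out) := by unfold Spec_find_relationship_entry; infer_instance

-- ===== CLAIM (what is proved, stated in full; the proofs are below) =====
def Claim_equal_find_relationship_entry : Prop := ∀ (sbom : List (String × List (List (String × String)))) (xUUID : Option String) (yUUID : Option String) (relationship : Option String), Dom_find_relationship_entry sbom xUUID yUUID relationship → Pre_find_relationship_entry sbom xUUID yUUID relationship → Spec_find_relationship_entry sbom xUUID yUUID relationship (find_relationship_entry sbom xUUID yUUID relationship)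

-- ===== LEMMAS AND PROOFS =====

-- A's all_match flag on one rel equals the conjunction of the three stage predicates
theorem pvMatch_eq (xUUID yUUID relationship : Option String) (rel : List (String × String)) :
    pvMatchA xUUID yUUID relationship rel
      = (((!pvTruthy xUUID) || (pvLookup rel "xUUID" == some (xUUID.getD ""))) &&
         ((!pvTruthy yUUID) || (pvLookup rel "yUUID" == some (yUUID.getD ""))) &&
         ((!pvTruthy relationship) || (pvLookup rel "relationship" == some (relationship.getD "")))) := by
  unfold pvMatchA
  cases pvTruthy xUUID <;> cases pvTruthy yUUID <;> cases pvTruthy relationship <;>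
    cases hx : pvLookup rel "xUUID" == some (xUUID.getD "") <;>
    cases hy : pvLookup rel "yUUID" == some (yUUID.getD "") <;>
    cases hr : pvLookup rel "relationship" == some (relationship.getD "") <;>
    simp_all

-- A's early-return loop is List.find?
theorem pvLoopA_eq_find? (xUUID yUUID relationship : Option String)
    (rels : List (List (String × String))) :
    pvLoopA xUUID yUUID relationship rels
      = rels.find? (pvMatchA xUUID yUUID relationship) := by
  induction rels with
  | nil => rfl
  | cons rel rest ih =>
    rw [pvLoopA, List.find?_cons]
    cases hb : pvMatchA xUUID yUUID relationship rel <;> simp [ih]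

-- head-of-filter is find?
theorem head?_filter {α : Type} (p : α → Bool) (l : List α) :
    (l.filter p).head? = l.find? p := by
  induction l with
  | nil => rfl
  | cons a t ih =>
    rw [List.filter_cons, List.find?_cons]
    cases hp : p a <;> simp [ih]

-- one stage is a filter by its predicate (truthy or not)
theorem pvStage_eq_filter (cands : List (List (String × String))) (k : String) (v : Option String) :
    pvStage cands (k, v)
      = cands.filter (fun rel => (!pvTruthy v) || (pvLookup rel k == some (v.getD ""))) := by
  unfold pvStage
  cases hv : pvTruthy v <;> simp

-- ===== VERDICT (by name: the statement is the Claim_ definition above) =====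
theorem find_relationship_entry_spec : Claim_equal_find_relationship_entry := by
  intro sbom xUUID yUUID relationship _ hpre
  obtain ⟨hsome, _⟩ := hpre
  unfold Spec_find_relationship_entry find_relationship_entry find_relationship_entry_alt
  obtain ⟨rels, hrels⟩ := Option.isSome_iff_exists.mp hsome
  rw [hrels]
  simp only [List.foldl_cons, List.foldl_nil, pvStage_eq_filter, List.filter_filter,
    head?_filter, pvLoopA_eq_find?]
  congr 1
  funext rel
  rw [pvMatch_eq]
  ac_rfl
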